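-- pv_equiv track=rewrite | github.com/mathbeveridge/asm | stackset/build_stack_set.py | reflect
-- ===== SOURCE A (Python) =====
-- def reflect(stack):
--     n = len(stack)
--     new_stack = []
--
--     for i in range(1,n+1):
--         new_stack.append([0]*i)
--
--     for i in range(len(stack)):
--         row = stack[i]
--         for j in range(len(row)):
--             new_stack[n-1-j][n-1-i] = stack[i][j]
--
--     return new_stack
-- ===== SOURCE B (Python) =====
-- def reflect(stack):
--     n = len(stack)
--     return [[stack[n - 1 - c][n - 1 - r] if n - 1 - r < len(stack[n - 1 - c]) else 0
--              for c in range(r + 1)] for r in range(n)]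
-- ===== Notes on version B (the rewrite author's own statement) =====
-- stated objective: simpler
-- what changed: B builds the reflected triangle directly as a nested gather comprehension over output positions (new[r][c] = stack[n-1-c][n-1-r], 0 where the source row is too short), instead of A's pre-allocating a triangle of zeros and scattering each source entry into it.
-- outside the precondition, e.g. on reflect([[1, 2]]): A returns [[2]], B returns [[1]]
import Mathlib
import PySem

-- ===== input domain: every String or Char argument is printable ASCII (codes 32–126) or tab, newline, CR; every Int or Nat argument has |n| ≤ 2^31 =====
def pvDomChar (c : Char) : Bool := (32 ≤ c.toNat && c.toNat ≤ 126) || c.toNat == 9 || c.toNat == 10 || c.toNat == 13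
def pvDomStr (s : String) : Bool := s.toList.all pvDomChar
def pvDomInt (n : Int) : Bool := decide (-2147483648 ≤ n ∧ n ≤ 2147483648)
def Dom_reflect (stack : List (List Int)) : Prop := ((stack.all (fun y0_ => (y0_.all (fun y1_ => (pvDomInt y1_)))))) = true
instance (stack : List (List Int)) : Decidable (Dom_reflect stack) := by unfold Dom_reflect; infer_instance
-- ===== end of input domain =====

-- B replaces A's allocate-zeros-then-scatter loops by a direct gather comprehension over output
-- positions (objective: simpler); equivalence is claimed on proper triangular stacks (Pre_).

-- ===== PORT A =====
-- Python list assignment xs[i] = v (negative index wraps, out-of-range raises); exact for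
-- effective indices in range — Pre_ keeps every index A uses in range.
def pySetIdx (xs : List Int) (i : Int) (v : Int) : List Int :=
  xs.set (if i < 0 then i + xs.length else i).toNat v

-- Python statement new_stack[r][c] = v : read row new_stack[r], set its c-th element in place.
def setEntry (m : List (List Int)) (r c : Int) (v : Int) : List (List Int) :=
  let ri := (if r < 0 then r + m.length else r).toNat
  m.set ri (pySetIdx (m.getD ri []) c v)

def reflect (stack : List (List Int)) : List (List Int) :=
  let n : Int := stack.length
  let new0 : List (List Int) :=
    (PySem.List.pyRange 1 (n + 1) 1).foldl (fun acc i => acc ++ [List.replicate i.toNat 0]) []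
  (PySem.List.pyRange 0 (stack.length : Int) 1).foldl
    (fun ns i =>
      let row := PySem.List.pyGetD stack i []
      (PySem.List.pyRange 0 (row.length : Int) 1).foldl
        (fun ms j => setEntry ms (n - 1 - j) (n - 1 - i) (PySem.List.pyGetD row j 0)) ns)
    new0

-- ===== PORT B =====
def reflect_alt (stack : List (List Int)) : List (List Int) :=
  let n : Int := stack.length
  (PySem.List.pyRange 0 n 1).map (fun r =>
    (PySem.List.pyRange 0 (r + 1) 1).map (fun c =>
      let srow := PySem.List.pyGetD stack (n - 1 - c) []
      if n - 1 - r < (srow.length : Int) then PySem.List.pyGetD srow (n - 1 - r) 0 else 0))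

-- ===== PRECONDITION & SPEC =====
-- Pre_ admits the (sub-)triangular stacks (row i has length at most i+1), the data this function
-- is written for; it excludes stacks with a row longer than i+1, where A either raises IndexError
-- or its scatter wraps a negative index around and silently overwrites other rows.
def Pre_reflect (stack : List (List Int)) : Prop :=
  ∀ p ∈ stack.zipIdx, p.1.length ≤ p.2 + 1
instance (stack : List (List Int)) : Decidable (Pre_reflect stack) := by
  unfold Pre_reflect; infer_instance

def pvWitness_reflect : List (List Int) := [[1], [2, 3], [4, 5, 6]]

def Spec_reflect (stack : List (List Int)) (out : List (List Int)) : Prop := out = reflect_alt stack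
instance (stack : List (List Int)) (out : List (List Int)) : Decidable (Spec_reflect stack out) := by unfold Spec_reflect; infer_instance

-- ===== CLAIM (what is proved, stated in full; the proofs are below) =====
def Claim_equal_reflect : Prop := ∀ (stack : List (List Int)), Dom_reflect stack → Pre_reflect stack → Spec_reflect stack (reflect stack)

-- ===== LEMMAS AND PROOFS =====

-- the fixed triangular shape: row r (r < n) is (range (r+1)).map (h r)
def mat (n : Nat) (h : Nat → Nat → Int) : List (List Int) :=
  (List.range n).map (fun r => (List.range (r + 1)).map (h r))

theorem mat_length (n : Nat) (h : Nat → Nat → Int) : (mat n h).length = n := by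
  simp [mat]

theorem mat_getElem (n : Nat) (h : Nat → Nat → Int) (r : Nat) (hr : r < (mat n h).length) :
    (mat n h)[r] = (List.range (r + 1)).map (h r) := by
  simp [mat]

theorem mat_ext (n : Nat) (f g : Nat → Nat → Int)
    (hfg : ∀ r, r < n → ∀ c, c ≤ r → f r c = g r c) : mat n f = mat n g := by
  unfold mat
  apply List.ext_getElem (by simp)
  intro r h1 h2
  simp only [List.length_map, List.length_range] at h1
  simp only [List.getElem_map, List.getElem_range]
  apply List.ext_getElem (by simp)
  intro c h3 h4
  simp only [List.length_map, List.length_range] at h3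
  simp only [List.getElem_map, List.getElem_range]
  exact hfg r h1 c (by omega)

theorem setEntry_mat (n : Nat) (h : Nat → Nat → Int) (r c : Nat) (hr : r < n)
    (v : Int) :
    setEntry (mat n h) (r : Int) (c : Int) v
      = mat n (fun r' c' => if r' = r ∧ c' = c then v else h r' c') := by
  have hri : ((if (r : Int) < 0 then (r : Int) + (mat n h).length else (r : Int)).toNat) = r := by
    rw [if_neg (by omega)]; omega
  have hrow : (mat n h).getD r [] = (List.range (r + 1)).map (h r) := by
    rw [List.getD_eq_getElem _ _ (by simpa [mat_length] using hr), mat_getElem]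
  have hci : ((if (c : Int) < 0 then (c : Int) + ((List.range (r + 1)).map (h r)).length else (c : Int)).toNat) = c := by
    rw [if_neg (by omega)]; omega
  simp only [setEntry, pySetIdx]
  rw [hri, hrow, hci]
  apply List.ext_getElem (by simp [mat_length])
  intro r' hr1 hr2
  simp only [List.length_set, mat_length] at hr1
  rw [List.getElem_set, mat_getElem _ _ _ (by simpa [mat_length] using hr1)]
  by_cases hrr : r = r'
  · subst hrr
    rw [if_pos rfl, mat_getElem _ _ _ (by simpa [mat_length] using hr1)]
    apply List.ext_getElem (by simp)
    intro c' hc1 hc2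
    simp only [List.length_set, List.length_map, List.length_range] at hc1
    rw [List.getElem_set]
    simp only [List.getElem_map, List.getElem_range]
    by_cases hcc : c = c'
    · subst hcc; simp
    · rw [if_neg hcc, if_neg (fun (hx : True ∧ c' = c) => hcc hx.2.symm)]
  · rw [if_neg hrr, mat_getElem _ _ _ (by simpa [mat_length] using hr1)]
    apply List.map_congr_left
    intro c' _
    exact (if_neg (fun (hx : r' = r ∧ c' = c) => hrr hx.1.symm)).symm


-- after k inner iterations (k ≤ i+1) of row i, column n-1-i is written at rows r ≥ n-k
theorem inner_inv (n : Nat) (row : List Int) (i : Nat) (hi : i < n)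
    (h : Nat → Nat → Int) (k : Nat) (hk : k ≤ i + 1) :
    (List.range k).foldl
      (fun ms j => setEntry ms ((n : Int) - 1 - ((j : Nat) : Int)) ((n : Int) - 1 - (i : Int))
        (PySem.List.pyGetD row ((j : Nat) : Int) 0))
      (mat n h)
    = mat n (fun r c => if c = n - 1 - i ∧ n - k ≤ r then row.getD (n - 1 - r) 0 else h r c) := by
  induction k with
  | zero =>
    simp only [List.range_zero, List.foldl_nil]
    apply mat_ext; intro r hr c hc
    rw [if_neg (fun hx => by omega)]
  | succ k ih =>
    rw [List.range_succ, List.foldl_append, ih (by omega)]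
    simp only [List.foldl_cons, List.foldl_nil]
    have e1 : (n : Int) - 1 - (k : Int) = ((n - 1 - k : Nat) : Int) := by omega
    have e2 : (n : Int) - 1 - (i : Int) = ((n - 1 - i : Nat) : Int) := by omega
    rw [e1, e2, PySem.List.pyGetD_natCast,
      setEntry_mat n _ (n - 1 - k) (n - 1 - i) (by omega)]
    apply mat_ext; intro r hr c hc
    by_cases h1 : r = n - 1 - k ∧ c = n - 1 - i
    · rw [if_pos h1, if_pos ⟨h1.2, by omega⟩]
      have : n - 1 - r = k := by omega
      rw [this]
    · rw [if_neg h1]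
      by_cases h2 : c = n - 1 - i ∧ n - k ≤ r
      · rw [if_pos h2, if_pos ⟨h2.1, by omega⟩]
      · rw [if_neg h2, if_neg]
        intro hx
        have hnk : ¬ (n - k ≤ r) := fun hle => h2 ⟨hx.1, hle⟩
        exact h1 ⟨by omega, hx.1⟩

-- after k outer iterations (k ≤ n) the columns c ≥ n-k hold the gathered values, the rest zeros
theorem outer_inv (stack : List (List Int)) (pre : ∀ i (h : i < stack.length), stack[i].length ≤ i + 1)
    (k : Nat) (hk : k ≤ stack.length) :
    (List.range k).foldl
      (fun ns (i : Nat) =>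
        let row := PySem.List.pyGetD stack ((i : Nat) : Int) []
        (PySem.List.pyRange 0 (row.length : Int) 1).foldl
          (fun ms j => setEntry ms ((stack.length : Int) - 1 - j) ((stack.length : Int) - 1 - ((i : Nat) : Int))
            (PySem.List.pyGetD row j 0)) ns)
      (mat stack.length (fun _ _ => 0))
    = mat stack.length (fun r c =>
        if stack.length - k ≤ c then
          (if stack.length - 1 - r < (stack.getD (stack.length - 1 - c) []).length then
            (stack.getD (stack.length - 1 - c) []).getD (stack.length - 1 - r) 0 else 0)
        else 0) := by
  induction k with
  | zero =>
    simp only [List.range_zero, List.foldl_nil]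
    apply mat_ext; intro r hr c hc
    rw [if_neg (by omega)]
  | succ k ih =>
    rw [List.range_succ, List.foldl_append, ih (by omega)]
    simp only [List.foldl_cons, List.foldl_nil]
    have hrow : PySem.List.pyGetD stack ((k : Nat) : Int) [] = stack.getD k [] :=
      PySem.List.pyGetD_natCast stack k []
    have hget : stack.getD k [] = stack[k]'(by omega) := List.getD_eq_getElem stack [] (by omega)
    have hlen : (stack.getD k []).length ≤ k + 1 := by rw [hget]; exact pre k (by omega)
    rw [hrow, PySem.List.pyRange_zero_nat]
    simp only [List.foldl_map]
    rw [inner_inv stack.length (stack.getD k []) k (by omega) _ (stack.getD k []).length hlen]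
    apply mat_ext; intro r hr c hc
    by_cases h1 : c = stack.length - 1 - k
    · have hck : stack.length - 1 - c = k := by omega
      rw [if_pos (show stack.length - (k + 1) ≤ c by omega), hck]
      by_cases h2 : stack.length - (stack.getD k []).length ≤ r
      · rw [if_pos ⟨h1, h2⟩, if_pos (by omega)]
      · rw [if_neg (fun hx => h2 hx.2), if_neg (by omega), if_neg (by omega)]
    · rw [if_neg (fun hx => h1 hx.1)]
      by_cases h3 : stack.length - k ≤ c
      · rw [if_pos h3, if_pos (show stack.length - (k + 1) ≤ c by omega)]
      · rw [if_neg h3, if_neg (show ¬(stack.length - (k + 1) ≤ c) by omega)]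

theorem reflect_eq_mat (stack : List (List Int))
    (pre : ∀ i (h : i < stack.length), stack[i].length ≤ i + 1) :
    reflect stack = mat stack.length (fun r c =>
      if stack.length - 1 - r < (stack.getD (stack.length - 1 - c) []).length then
        (stack.getD (stack.length - 1 - c) []).getD (stack.length - 1 - r) 0 else 0) := by
  have hnew0 : (PySem.List.pyRange 1 ((stack.length : Int) + 1) 1).foldl
      (fun acc i => acc ++ [List.replicate i.toNat 0]) []
      = mat stack.length (fun _ _ => 0) := by
    rw [PySem.List.foldl_append_singleton_eq_map, PySem.List.pyRange_one, List.map_map]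
    have hl : (((stack.length : Int) + 1) - 1).toNat = stack.length := by omega
    rw [hl]
    unfold mat
    rw [List.nil_append]
    apply List.map_congr_left
    intro r hr
    have : ((1 : Int) + (r : Int)).toNat = r + 1 := by omega
    simp only [Function.comp, this]
    rw [List.map_const', List.length_range]
  simp only [reflect]
  rw [hnew0, PySem.List.pyRange_zero_nat]
  simp only [List.foldl_map]
  refine (outer_inv stack pre stack.length (le_refl _)).trans ?_
  apply mat_ext
  intro r hr c hc
  rw [if_pos (by omega)]

theorem reflect_alt_eq_mat (stack : List (List Int)) :
    reflect_alt stack = mat stack.length (fun r c =>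
      let srow := PySem.List.pyGetD stack ((stack.length : Int) - 1 - (c : Int)) []
      if (stack.length : Int) - 1 - (r : Int) < (srow.length : Int) then
        PySem.List.pyGetD srow ((stack.length : Int) - 1 - (r : Int)) 0 else 0) := by
  simp only [reflect_alt]
  rw [PySem.List.pyRange_zero_nat, List.map_map]
  unfold mat
  apply List.map_congr_left
  intro r hr
  have : ((r : Nat) : Int) + 1 = (((r + 1 : Nat)) : Int) := by omega
  simp only [Function.comp, this]
  rw [PySem.List.pyRange_zero_nat, List.map_map]
  rfl

-- ===== VERDICT (by name: the statement is the Claim_ definition above) =====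
theorem reflect_spec : Claim_equal_reflect := by
  intro stack _ hpre
  have pre : ∀ i (h : i < stack.length), stack[i].length ≤ i + 1 := by
    intro i h
    have hm : (stack[i], i) ∈ stack.zipIdx := by
      have := List.getElem_zipIdx (l := stack) (j := 0) (i := i) (by simpa using h)
      simp only [Nat.zero_add] at this
      rw [← this]; exact List.getElem_mem _
    exact hpre _ hm
  show reflect stack = reflect_alt stack
  rw [reflect_eq_mat stack pre, reflect_alt_eq_mat]
  apply mat_ext
  intro r hr c hc
  have h1 : ((stack.length : Int) - 1 - (c : Int)) = ((stack.length - 1 - c : Nat) : Int) := by omega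
  have h2 : ((stack.length : Int) - 1 - (r : Int)) = ((stack.length - 1 - r : Nat) : Int) := by omega
  simp only [h1, h2, PySem.List.pyGetD_natCast, Nat.cast_lt]
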